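-- pv_equiv track=rewrite | github.com/opensourceclaw/claw-mem | archive/v1.0.x/test_v070_comprehensive.py | generate_test_memories
-- ===== SOURCE A (Python) =====
-- def generate_test_memories(count: int = 1000) -> list:
--     """Generate test memories"""
--     templates = [
--         "用户询问 {} 的天气",
--         "用户偏好{}",
--         "Python 是一种{}编程语言",
--         "记忆条目编号{}",
--         "测试数据{}",
--         "claw-mem 功能测试{}",
--         "索引压缩测试{}",
--         "性能优化测试{}",
--     ]
--
--     locations = ["北京", "上海", "广州", "深圳", "杭州", "成都", "武汉", "西安"]
--     preferences = ["简洁回答", "详细解释", "使用列表", "使用表格", "中文交流", "英文交流"]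
--     types = ["通用", "面向对象", "函数式", "动态类型", "解释型"]
--
--     memories = []
--     for i in range(count):
--         template = templates[i % len(templates)]
--         if "{}" in template:
--             if "天气" in template:
--                 content = template.format(locations[i % len(locations)])
--             elif "偏好" in template:
--                 content = template.format(preferences[i % len(preferences)])
--             elif "编程语言" in template:
--                 content = template.format(types[i % len(types)])
--             else:
--                 content = template.format(i)
--         else:
--             content = template
--
--         memories.append({
--             "id": str(i),
--             "content": content
--         })
--
--     return memories
-- ===== SOURCE B (Python) =====
-- def generate_test_memories(count: int = 1000) -> list:
--     """Generate test memories (dispatch table keyed by template index, no substring tests)"""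
--     locations = ["北京", "上海", "广州", "深圳", "杭州", "成都", "武汉", "西安"]
--     preferences = ["简洁回答", "详细解释", "使用列表", "使用表格", "中文交流", "英文交流"]
--     types = ["通用", "面向对象", "函数式", "动态类型", "解释型"]
--
--     producers = [
--         lambda i: "用户询问 {} 的天气".format(locations[i % len(locations)]),
--         lambda i: "用户偏好{}".format(preferences[i % len(preferences)]),
--         lambda i: "Python 是一种{}编程语言".format(types[i % len(types)]),
--         lambda i: "记忆条目编号{}".format(i),
--         lambda i: "测试数据{}".format(i),
--         lambda i: "claw-mem 功能测试{}".format(i),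
--         lambda i: "索引压缩测试{}".format(i),
--         lambda i: "性能优化测试{}".format(i),
--     ]
--
--     return [{"id": str(i), "content": producers[i % len(producers)](i)}
--             for i in range(count)]
-- ===== Notes on version B (the rewrite author's own statement) =====
-- stated objective: idiomatic
-- what changed: Replaces the foldl-append loop with substring-membership tests ('{}'/'天气'/'偏好'/'编程语言' in template) by a list comprehension over a dispatch table of per-template-index producer lambdas, computing each content directly from i % 8.
import Mathlib
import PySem

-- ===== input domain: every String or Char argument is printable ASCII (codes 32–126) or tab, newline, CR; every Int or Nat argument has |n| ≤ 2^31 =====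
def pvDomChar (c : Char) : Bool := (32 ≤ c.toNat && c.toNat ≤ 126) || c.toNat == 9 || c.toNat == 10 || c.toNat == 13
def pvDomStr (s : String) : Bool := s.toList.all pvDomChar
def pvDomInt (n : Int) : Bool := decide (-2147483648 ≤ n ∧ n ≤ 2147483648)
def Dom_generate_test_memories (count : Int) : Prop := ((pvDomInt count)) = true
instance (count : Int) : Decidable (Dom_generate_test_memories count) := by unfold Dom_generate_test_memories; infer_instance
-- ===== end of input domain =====

-- B replaces A's substring-test branch chain by a dispatch table of producers indexed by i % 8 (objective: idiomatic).

-- ===== PORT A =====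
-- template.format(x) is ported as PySem.Str.replace template "{}" x: each template
-- contains exactly one "{}", so replacing every occurrence is exact here.
def generate_test_memories (count : Int) : List (List (String × String)) :=
  let templates : List String :=
    ["用户询问 {} 的天气", "用户偏好{}", "Python 是一种{}编程语言", "记忆条目编号{}",
     "测试数据{}", "claw-mem 功能测试{}", "索引压缩测试{}", "性能优化测试{}"]
  let locations : List String := ["北京", "上海", "广州", "深圳", "杭州", "成都", "武汉", "西安"]
  let preferences : List String := ["简洁回答", "详细解释", "使用列表", "使用表格", "中文交流", "英文交流"]
  let types : List String := ["通用", "面向对象", "函数式", "动态类型", "解释型"]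
  (PySem.List.pyRange 0 count 1).foldl (fun memories i =>
    let template := PySem.List.pyGetD templates (PySem.Int.mod i (templates.length : Int)) ""
    let content :=
      if PySem.Str.isIn "{}" template then
        if PySem.Str.isIn "天气" template then
          PySem.Str.replace template "{}" (PySem.List.pyGetD locations (PySem.Int.mod i (locations.length : Int)) "")
        else if PySem.Str.isIn "偏好" template then
          PySem.Str.replace template "{}" (PySem.List.pyGetD preferences (PySem.Int.mod i (preferences.length : Int)) "")
        else if PySem.Str.isIn "编程语言" template then
          PySem.Str.replace template "{}" (PySem.List.pyGetD types (PySem.Int.mod i (types.length : Int)) "")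
        else
          PySem.Str.replace template "{}" (PySem.Int.toStr i)
      else template
    memories ++ [[("id", PySem.Int.toStr i), ("content", content)]]) []

-- ===== PORT B =====
-- dispatch table: one content producer per template index 0..7 (from Source B)
def gtmProducers : List (Int → String) :=
  let locations : List String := ["北京", "上海", "广州", "深圳", "杭州", "成都", "武汉", "西安"]
  let preferences : List String := ["简洁回答", "详细解释", "使用列表", "使用表格", "中文交流", "英文交流"]
  let types : List String := ["通用", "面向对象", "函数式", "动态类型", "解释型"]
  [fun i => PySem.Str.replace "用户询问 {} 的天气" "{}" (PySem.List.pyGetD locations (PySem.Int.mod i (locations.length : Int)) ""),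
   fun i => PySem.Str.replace "用户偏好{}" "{}" (PySem.List.pyGetD preferences (PySem.Int.mod i (preferences.length : Int)) ""),
   fun i => PySem.Str.replace "Python 是一种{}编程语言" "{}" (PySem.List.pyGetD types (PySem.Int.mod i (types.length : Int)) ""),
   fun i => PySem.Str.replace "记忆条目编号{}" "{}" (PySem.Int.toStr i),
   fun i => PySem.Str.replace "测试数据{}" "{}" (PySem.Int.toStr i),
   fun i => PySem.Str.replace "claw-mem 功能测试{}" "{}" (PySem.Int.toStr i),
   fun i => PySem.Str.replace "索引压缩测试{}" "{}" (PySem.Int.toStr i),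
   fun i => PySem.Str.replace "性能优化测试{}" "{}" (PySem.Int.toStr i)]

def generate_test_memories_alt (count : Int) : List (List (String × String)) :=
  (PySem.List.pyRange 0 count 1).map (fun i =>
    [("id", PySem.Int.toStr i),
     ("content", (PySem.List.pyGetD gtmProducers (PySem.Int.mod i (gtmProducers.length : Int)) (fun _ => "")) i)])

-- ===== PRECONDITION & SPEC =====
def Spec_generate_test_memories (count : Int) (out : List (List (String × String))) : Prop := out = generate_test_memories_alt count
instance (count : Int) (out : List (List (String × String))) : Decidable (Spec_generate_test_memories count out) := by unfold Spec_generate_test_memories; infer_instance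

-- ===== CLAIM (what is proved, stated in full; the proofs are below) =====
def Claim_equal_generate_test_memories : Prop := ∀ (count : Int), Dom_generate_test_memories count → Spec_generate_test_memories count (generate_test_memories count)

-- ===== LEMMAS AND PROOFS =====

-- A's per-iteration content equals B's dispatched producer at i (case split on i % 8)
set_option maxHeartbeats 1000000 in
theorem gtm_content_eq (i : Int) :
    (let templates : List String :=
      ["用户询问 {} 的天气", "用户偏好{}", "Python 是一种{}编程语言", "记忆条目编号{}",
       "测试数据{}", "claw-mem 功能测试{}", "索引压缩测试{}", "性能优化测试{}"]
     let locations : List String := ["北京", "上海", "广州", "深圳", "杭州", "成都", "武汉", "西安"]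
     let preferences : List String := ["简洁回答", "详细解释", "使用列表", "使用表格", "中文交流", "英文交流"]
     let types : List String := ["通用", "面向对象", "函数式", "动态类型", "解释型"]
     let template := PySem.List.pyGetD templates (PySem.Int.mod i (templates.length : Int)) ""
     if PySem.Str.isIn "{}" template then
       if PySem.Str.isIn "天气" template then
         PySem.Str.replace template "{}" (PySem.List.pyGetD locations (PySem.Int.mod i (locations.length : Int)) "")
       else if PySem.Str.isIn "偏好" template then
         PySem.Str.replace template "{}" (PySem.List.pyGetD preferences (PySem.Int.mod i (preferences.length : Int)) "")
       else if PySem.Str.isIn "编程语言" template then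
         PySem.Str.replace template "{}" (PySem.List.pyGetD types (PySem.Int.mod i (types.length : Int)) "")
       else
         PySem.Str.replace template "{}" (PySem.Int.toStr i)
     else template) =
    (PySem.List.pyGetD gtmProducers (PySem.Int.mod i (gtmProducers.length : Int)) (fun _ => "")) i := by
  have hcase : i % 8 = 0 ∨ i % 8 = 1 ∨ i % 8 = 2 ∨ i % 8 = 3 ∨ i % 8 = 4 ∨
      i % 8 = 5 ∨ i % 8 = 6 ∨ i % 8 = 7 := by omega
  rcases hcase with h|h|h|h|h|h|h|h
  · simp [gtmProducers, h, PySem.List.pyGetD, PySem.List.pyGet?, PySem.List.pyIdx?]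
    rw [if_pos (by decide), if_pos (by decide)]
  · simp [gtmProducers, h, PySem.List.pyGetD, PySem.List.pyGet?, PySem.List.pyIdx?]
    rw [if_pos (by decide), if_neg (by decide), if_pos (by decide)]
  · simp [gtmProducers, h, PySem.List.pyGetD, PySem.List.pyGet?, PySem.List.pyIdx?]
    rw [if_pos (by decide), if_neg (by decide), if_neg (by decide), if_pos (by decide)]
  · simp [gtmProducers, h, PySem.List.pyGetD, PySem.List.pyGet?, PySem.List.pyIdx?]
    rw [if_pos (by decide), if_neg (by decide), if_neg (by decide), if_neg (by decide)]
  · simp [gtmProducers, h, PySem.List.pyGetD, PySem.List.pyGet?, PySem.List.pyIdx?]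
    rw [if_pos (by decide), if_neg (by decide), if_neg (by decide), if_neg (by decide)]
  · simp [gtmProducers, h, PySem.List.pyGetD, PySem.List.pyGet?, PySem.List.pyIdx?]
    rw [if_pos (by decide), if_neg (by decide), if_neg (by decide), if_neg (by decide)]
  · simp [gtmProducers, h, PySem.List.pyGetD, PySem.List.pyGet?, PySem.List.pyIdx?]
    rw [if_pos (by decide), if_neg (by decide), if_neg (by decide), if_neg (by decide)]
  · simp [gtmProducers, h, PySem.List.pyGetD, PySem.List.pyGet?, PySem.List.pyIdx?]
    rw [if_pos (by decide), if_neg (by decide), if_neg (by decide), if_neg (by decide)]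

-- ===== VERDICT (by name: the statement is the Claim_ definition above) =====
theorem generate_test_memories_spec : Claim_equal_generate_test_memories := by
  intro count _
  unfold Spec_generate_test_memories generate_test_memories generate_test_memories_alt
  simp only [PySem.List.foldl_append_singleton_eq_map, List.nil_append]
  refine List.map_congr_left ?_
  intro i _
  exact congrArg (fun c => [("id", PySem.Int.toStr i), ("content", c)]) (gtm_content_eq i)
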